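-- pv_equiv track=rewrite | github.com/dmiyakawa/atcoder-workspace | abc027/C/main.py | solve
-- ===== SOURCE A (Python) =====
-- def solve(N: int):
--     m = 0
--     ac = 0
--     while True:
--         M = 4**m
--         if N < ac + M:
--             return True
--         elif N < ac + 2 * M:
--             return False
--         ac += 2 * M
--         m += 1
-- ===== SOURCE B (Python) =====
-- def solve(N: int):
--     if N <= 0:
--         return True
--     y = 3 * N + 2
--     m = (y.bit_length() - 2) // 2
--     return y < 5 * (1 << (2 * m))
-- ===== Notes on version B (the rewrite author's own statement) =====
-- stated objective: simpler
-- what changed: Replaces A's iterative block-walking while-loop over powers of 4 with a direct closed-form computation: y = 3N+2, block index from y.bit_length(), and one comparison.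
import Mathlib
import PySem

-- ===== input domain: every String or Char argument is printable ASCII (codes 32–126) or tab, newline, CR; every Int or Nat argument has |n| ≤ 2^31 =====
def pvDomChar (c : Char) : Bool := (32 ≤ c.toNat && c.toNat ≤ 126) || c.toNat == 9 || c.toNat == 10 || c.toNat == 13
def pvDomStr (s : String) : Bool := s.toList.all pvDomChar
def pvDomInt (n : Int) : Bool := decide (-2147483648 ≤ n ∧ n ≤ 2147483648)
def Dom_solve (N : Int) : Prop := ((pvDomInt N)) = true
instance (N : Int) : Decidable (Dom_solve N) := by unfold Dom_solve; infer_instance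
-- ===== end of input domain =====

-- B replaces A's block-walking loop with a closed-form bit_length computation (simpler).

-- ===== PORT A =====
-- the 'while True' loop of A; terminates because ac strictly grows towards N
def solveLoop (N : Int) (m : Nat) (ac : Int) : Bool :=
  let M : Int := 4 ^ m
  if N < ac + M then true
  else if N < ac + 2 * M then false
  else solveLoop N (m + 1) (ac + 2 * M)
termination_by (N - ac).toNat
decreasing_by
  have h1 : (1:Int) ≤ 4 ^ m := one_le_pow₀ (by norm_num)
  omega

def solve (N : Int) : Bool := solveLoop N 0 0

-- ===== PORT B =====
-- y.bit_length() for y ≥ 1 equals Nat.log2 y.toNat + 1 (exact there; B only calls it on y ≥ 5)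
def solve_alt (N : Int) : Bool :=
  if N ≤ 0 then true
  else
    let y : Int := 3 * N + 2
    let m : Nat := (Nat.log2 y.toNat + 1 - 2) / 2
    decide (y < 5 * 2 ^ (2 * m))

-- ===== PRECONDITION & SPEC =====
def Spec_solve (N : Int) (out : Bool) : Prop := out = solve_alt N
instance (N : Int) (out : Bool) : Decidable (Spec_solve N out) := by unfold Spec_solve; infer_instance

-- ===== CLAIM (what is proved, stated in full; the proofs are below) =====
def Claim_equal_solve : Prop := ∀ (N : Int), Dom_solve N → Spec_solve N (solve N)

-- ===== LEMMAS AND PROOFS =====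

-- The loop, started at block m with ac = (2*4^m - 2)/3, returns exactly "3N+2 < 5*4^m'"
-- where m' is the block of y = 3N+2.
theorem loop_eq (N : Int) (m' : Nat)
    (hlb : 2 * 4 ^ m' ≤ 3 * N + 2) (hub : 3 * N + 2 < 2 * 4 ^ (m' + 1)) :
    ∀ k m ac, m + k = m' → 3 * ac + 2 = 2 * 4 ^ m →
      solveLoop N m ac = decide (3 * N + 2 < 5 * 4 ^ m') := by
  intro k
  induction k with
  | zero =>
      intro m ac hm hac
      have hm' : m = m' := by omega
      subst hm'
      rw [solveLoop]
      have h1 : (1:Int) ≤ 4 ^ m := one_le_pow₀ (by norm_num)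
      have h4 : (4:Int) ^ (m + 1) = 4 * 4 ^ m := by ring
      by_cases hc : N < ac + 4 ^ m
      · simp only [hc, if_true]
        have : 3 * N + 2 < 5 * 4 ^ m := by omega
        simp [this]
      · simp only [hc, if_false]
        have hc2 : N < ac + 2 * 4 ^ m := by omega
        simp only [hc2, if_true]
        have : ¬ (3 * N + 2 < 5 * 4 ^ m) := by omega
        simp [this]
  | succ k ih =>
      intro m ac hm hac
      have hmm : m + 1 ≤ m' := by omega
      have hmono : (4:Int) ^ (m + 1) ≤ 4 ^ m' :=
        pow_le_pow_right₀ (by norm_num) hmm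
      have h4 : (4:Int) ^ (m + 1) = 4 * 4 ^ m := by ring
      have h1 : (1:Int) ≤ 4 ^ m := one_le_pow₀ (by norm_num)
      rw [solveLoop]
      have hc : ¬ N < ac + 4 ^ m := by omega
      have hc2 : ¬ N < ac + 2 * 4 ^ m := by omega
      simp only [hc, hc2, if_false]
      exact ih (m + 1) (ac + 2 * 4 ^ m) (by omega) (by rw [h4]; omega)

theorem pow4_two_pow (m : Nat) : (4:Int) ^ m = 2 ^ (2 * m) := by
  rw [pow_mul]; norm_num

-- ===== VERDICT (by name: the statement is the Claim_ definition above) =====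
theorem solve_spec : Claim_equal_solve := by
  intro N _
  unfold Spec_solve solve solve_alt
  by_cases hN : N ≤ 0
  · rw [solveLoop]
    simp [hN]
    exact Or.inl (by omega)
  · simp only [hN, if_false]
    have hN1 : 1 ≤ N := by omega
    set y : Int := 3 * N + 2 with hy
    have hy5 : 5 ≤ y := by omega
    have hytn : (y.toNat : Int) = y := Int.toNat_of_nonneg (by omega)
    set L : Nat := Nat.log2 y.toNat with hL
    have hyne : y.toNat ≠ 0 := by omega
    have hlbL : 2 ^ L ≤ y.toNat := Nat.log2_self_le hyne
    have hubL : y.toNat < 2 ^ (L + 1) := Nat.lt_log2_self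
    have hL2 : 2 ≤ L := by
      rw [hL, Nat.le_log2 hyne]; omega
    set m : Nat := (L + 1 - 2) / 2 with hm
    -- block bounds for m: 2*4^m ≤ y < 2*4^(m+1)
    have hexp1 : 2 * m + 1 ≤ L := by omega
    have hexp2 : L + 1 ≤ 2 * m + 3 := by omega
    have hlb : 2 * 4 ^ m ≤ y := by
      have h1 : (2:Int) * 4 ^ m = 2 ^ (2 * m + 1) := by
        rw [pow4_two_pow]; ring
      have h2 : (2:Int) ^ (2 * m + 1) ≤ 2 ^ L :=
        pow_le_pow_right₀ (by norm_num) hexp1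
      have h3 : ((2:Nat) ^ L : Int) ≤ y := by
        rw [← hytn]; exact_mod_cast hlbL
      push_cast at h3
      omega
    have hub : y < 2 * 4 ^ (m + 1) := by
      have h1 : (2:Int) * 4 ^ (m + 1) = 2 ^ (2 * m + 3) := by
        rw [pow4_two_pow]; ring
      have h2 : (2:Int) ^ (L + 1) ≤ 2 ^ (2 * m + 3) :=
        pow_le_pow_right₀ (by norm_num) hexp2
      have h3 : y < ((2:Nat) ^ (L + 1) : Int) := by
        rw [← hytn]; exact_mod_cast hubL
      push_cast at h3
      omega
    have := loop_eq N m hlb hub m 0 0 (by omega) (by norm_num)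
    rw [this, pow4_two_pow]
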